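-- pv_equiv track=rewrite | github.com/SwapnilDoijad/nanoCutter | scripts/Collapser.py | rc_repeats_coords
-- ===== SOURCE A (Python) =====
-- from collections import defaultdict, Counter
--
-- _rc_map = str.maketrans("ACGTNacgtn", "TGCANtgcan")
--
-- def revcomp(s: str) -> str:
--     """Return the reverse-complement of DNA sequence `s`.
--
--     Example: revcomp('ACG') -> 'CGT'
--     The translation map handles upper- and lower-case bases and 'U'->'T'
--     is enforced later during sequence reading.
--     """
--     return s.translate(_rc_map)[::-1]
--
-- def rc_repeats_coords(s: str, k: int, step: int, min_seeds: int = 1) -> tuple[int,int,int,int]: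
--     """Detect dominant reverse-complement (RC) anti-diagonal.
--
--     If a sequence contains a strong RC-junction (for example a circular
--     molecule concatenated in opposite orientation), then many k-mers will
--     match to reverse-complemented positions and these pairs concentrate
--     on an anti-diagonal in the self dotplot. This function finds the
--     dominant anti-diagonal by simple binning and returns a 1-based
--     inclusive coordinate split (start1,end1,start2,end2) describing the
--     best place to cut the sequence into two parts (left/right).
--
--     If no RC pairs are detected, the whole sequence range is returned.
--     """
--     n = len(s)
--     idx = defaultdict(list)
--     for i in range(0, n - k + 1, step):
--         idx[s[i:i+k]].append(i)
--     rc_pairs = []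
--     for i in range(0, n - k + 1, step):
--         for j in idx.get(revcomp(s[i:i+k]), []):
--             if i != j: rc_pairs.append((i, j))
--     if not rc_pairs: return (1, n, 1, n)
--     bin_size = max(5, k)
--     hist = defaultdict(int)
--     for i, j in rc_pairs: hist[(i + j)//bin_size] += 1
--     peak = max(hist, key=hist.get)
--     # require a minimum number of RC k-mer seed pairs in the peak to accept a split
--     peak_count = hist.get(peak, 0)
--     if peak_count < max(1, min_seeds):
--         return (1, n, 1, n)
--     cand = [(i,j) for i,j in rc_pairs if abs(((i+j)//bin_size)-peak) <= 1] or rc_pairs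
--     max_i = max(i for i,_ in cand); min_j = min(j for _,j in cand)
--     t = (max_i + k + min_j) // 2  # 0-based split point
--     return (1, t, t+1, n)
-- ===== SOURCE B (Python) =====
-- _rc_map = str.maketrans("ACGTNacgtn", "TGCANtgcan")
--
-- def revcomp(s: str) -> str:
--     return s.translate(_rc_map)[::-1]
--
-- def rc_repeats_coords(s: str, k: int, step: int, min_seeds: int = 1) -> tuple[int, int, int, int]:
--     n = len(s)
--     idx = {}
--     for i in range(0, n - k + 1, step):
--         idx.setdefault(s[i:i+k], []).append(i)
--     bin_size = max(5, k)
--     # one pass over the RC pairs: per-bin (count, running max i, running min j)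
--     stats = {}
--     for i in range(0, n - k + 1, step):
--         for j in idx.get(revcomp(s[i:i+k]), ()):
--             if i != j:
--                 b = (i + j) // bin_size
--                 st = stats.get(b)
--                 if st is None:
--                     stats[b] = (1, i, j)
--                 else:
--                     stats[b] = (st[0] + 1, max(st[1], i), min(st[2], j))
--     if not stats:
--         return (1, n, 1, n)
--     peak = max(stats, key=lambda b: stats[b][0])
--     if stats[peak][0] < max(1, min_seeds):
--         return (1, n, 1, n)
--     near = [b for b in (peak - 1, peak, peak + 1) if b in stats]
--     max_i = max(stats[b][1] for b in near)
--     min_j = min(stats[b][2] for b in near)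
--     t = (max_i + k + min_j) // 2
--     return (1, t, t + 1, n)
-- ===== Notes on version B (the rewrite author's own statement) =====
-- stated objective: alternative
-- what changed: B never materialises the rc_pairs list, the histogram dict, or the candidate rescan: one pass over the RC k-mer pairs maintains a single dict of per-bin (count, running max i, running min j), from which the peak, the min_seeds gate and the cut point are read off directly.
import Mathlib
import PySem

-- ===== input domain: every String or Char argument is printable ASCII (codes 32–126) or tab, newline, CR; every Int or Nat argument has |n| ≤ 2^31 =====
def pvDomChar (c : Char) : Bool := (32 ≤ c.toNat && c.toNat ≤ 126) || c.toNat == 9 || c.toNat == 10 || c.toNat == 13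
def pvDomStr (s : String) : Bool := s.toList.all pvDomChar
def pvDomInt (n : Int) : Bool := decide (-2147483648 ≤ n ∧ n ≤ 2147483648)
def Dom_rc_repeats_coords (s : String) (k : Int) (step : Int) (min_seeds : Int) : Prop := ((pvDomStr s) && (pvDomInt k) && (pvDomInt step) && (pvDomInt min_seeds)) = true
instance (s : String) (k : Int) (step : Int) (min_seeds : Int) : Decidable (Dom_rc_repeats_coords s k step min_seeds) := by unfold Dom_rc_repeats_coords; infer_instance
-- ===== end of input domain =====

-- B replaces A's rc_pairs list + histogram + candidate rescan by a single pass keeping per-bin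
-- (count, max i, min j); same return value on every input with step ≠ 0 (objective: alternative decomposition).

-- shared helper: Python's revcomp — str.translate over the equal-length maketrans table is a
-- per-character map, and [::-1] is reverse (PySem.List.slice?_none_none_neg_one); exact on all inputs.
def pvRcChar (c : Char) : Char :=
  if c = 'A' then 'T' else if c = 'C' then 'G' else if c = 'G' then 'C' else if c = 'T' then 'A'
  else if c = 'a' then 't' else if c = 'c' then 'g' else if c = 'g' then 'c' else if c = 't' then 'a'
  else c  -- 'N'/'n' map to themselves, other chars unchanged

def pvRevcomp (cs : List Char) : List Char := (cs.map pvRcChar).reverse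

-- shared helper: s[i:i+k]
def pvKmer (cs : List Char) (k : Int) (i : Int) : List Char :=
  PySem.List.slice cs (some i) (some (i + k))

-- ===== PORT A =====
def rc_repeats_coords (s : String) (k : Int) (step : Int) (min_seeds : Int) : Int × Int × Int × Int :=
  let cs := s.toList
  let n : Int := PySem.List.len cs
  let irange := PySem.List.pyRange 0 (n - k + 1) step
  -- defaultdict(list); idx[s[i:i+k]].append(i) = modify with default []
  let idx : PySem.Dict (List Char) (List Int) :=
    irange.foldl (fun d i => d.modify (pvKmer cs k i) [] (fun l => l ++ [i])) PySem.Dict.empty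
  let rc_pairs : List (Int × Int) :=
    irange.foldl (fun L i =>
      (idx.getD (pvRevcomp (pvKmer cs k i)) []).foldl
        (fun L j => if i ≠ j then L ++ [(i, j)] else L) L) []
  if rc_pairs = [] then (1, n, 1, n) else
    let bin_size : Int := max 5 k
    let hist : PySem.Dict Int Int :=
      rc_pairs.foldl (fun d p => d.modify (PySem.Int.floordiv (p.1 + p.2) bin_size) 0 (fun c => c + 1)) PySem.Dict.empty
    -- max(hist, key=hist.get): first key with maximal count
    let peak : Int := (PySem.List.max? hist.keys (fun b => hist.getD b 0)).getD 0
    let peak_count : Int := hist.getD peak 0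
    if peak_count < max 1 min_seeds then (1, n, 1, n) else
      let cand0 := rc_pairs.filter (fun p => decide ((PySem.Int.floordiv (p.1 + p.2) bin_size - peak).natAbs ≤ 1))
      let cand := if cand0 = [] then rc_pairs else cand0
      -- cand is provably nonempty here, so the .getD 0 default of max?/min? is never used
      let max_i : Int := (PySem.List.max? (cand.map Prod.fst) (fun x => x)).getD 0
      let min_j : Int := (PySem.List.min? (cand.map Prod.snd) (fun x => x)).getD 0
      let t := PySem.Int.floordiv (max_i + k + min_j) 2
      (1, t, t + 1, n)

-- ===== PORT B =====
-- Source B's inner-loop body: fetch the bin's (count, max i, min j) and write back the update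
def pvStatsStep (bin_size : Int) (d : PySem.Dict Int (Int × Int × Int)) (i j : Int) : PySem.Dict Int (Int × Int × Int) :=
  d.insert (PySem.Int.floordiv (i + j) bin_size)
    (match d.get? (PySem.Int.floordiv (i + j) bin_size) with
     | none => (1, i, j)
     | some st => (st.1 + 1, max st.2.1 i, min st.2.2 j))

def rc_repeats_coords_alt (s : String) (k : Int) (step : Int) (min_seeds : Int) : Int × Int × Int × Int :=
  let cs := s.toList
  let n : Int := PySem.List.len cs
  let irange := PySem.List.pyRange 0 (n - k + 1) step
  -- idx.setdefault(s[i:i+k], []).append(i) = modify with default []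
  let idx : PySem.Dict (List Char) (List Int) :=
    irange.foldl (fun d i => d.modify (pvKmer cs k i) [] (fun l => l ++ [i])) PySem.Dict.empty
  let bin_size : Int := max 5 k
  let stats : PySem.Dict Int (Int × Int × Int) :=
    irange.foldl (fun d i =>
      (idx.getD (pvRevcomp (pvKmer cs k i)) []).foldl
        (fun d j => if i ≠ j then pvStatsStep bin_size d i j else d) d) PySem.Dict.empty
  if stats.items = [] then (1, n, 1, n) else
    let peak : Int := (PySem.List.max? stats.keys (fun b => (stats.getD b (0, 0, 0)).1)).getD 0
    if (stats.getD peak (0, 0, 0)).1 < max 1 min_seeds then (1, n, 1, n) else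
      let near := [peak - 1, peak, peak + 1].filter (fun b => stats.contains b)
      -- near is provably nonempty here (peak ∈ stats), so the .getD 0 default is never used
      let max_i : Int := (PySem.List.max? (near.map (fun b => (stats.getD b (0, 0, 0)).2.1)) (fun x => x)).getD 0
      let min_j : Int := (PySem.List.min? (near.map (fun b => (stats.getD b (0, 0, 0)).2.2)) (fun x => x)).getD 0
      let t := PySem.Int.floordiv (max_i + k + min_j) 2
      (1, t, t + 1, n)

-- ===== PRECONDITION & SPEC =====
-- Pre_ excludes only step = 0, where Python's range(0, n-k+1, step) raises ValueError in A (and in B).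
def Pre_rc_repeats_coords (s : String) (k : Int) (step : Int) (min_seeds : Int) : Prop := step ≠ 0
instance (s : String) (k : Int) (step : Int) (min_seeds : Int) : Decidable (Pre_rc_repeats_coords s k step min_seeds) := by unfold Pre_rc_repeats_coords; infer_instance

def pvWitness_rc_repeats_coords : String × Int × Int × Int := ("ACGTACGT", 2, 1, 1)

def Spec_rc_repeats_coords (s : String) (k : Int) (step : Int) (min_seeds : Int) (out : Int × Int × Int × Int) : Prop := out = rc_repeats_coords_alt s k step min_seeds
instance (s : String) (k : Int) (step : Int) (min_seeds : Int) (out : Int × Int × Int × Int) : Decidable (Spec_rc_repeats_coords s k step min_seeds out) := by unfold Spec_rc_repeats_coords; infer_instance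

-- ===== CLAIM (what is proved, stated in full; the proofs are below) =====
def Claim_equal_rc_repeats_coords : Prop := ∀ (s : String) (k : Int) (step : Int) (min_seeds : Int), Dom_rc_repeats_coords s k step min_seeds → Pre_rc_repeats_coords s k step min_seeds → Spec_rc_repeats_coords s k step min_seeds (rc_repeats_coords s k step min_seeds)

-- ===== LEMMAS AND PROOFS =====

-- ---- proof-only definitions ----

-- the bin of an RC pair
def pvBin (bs : Int) (p : Int × Int) : Int := PySem.Int.floordiv (p.1 + p.2) bs

-- the pairs of L falling in bin b
def pvFlt (bs b : Int) (L : List (Int × Int)) : List (Int × Int) :=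
  L.filter (fun p => pvBin bs p == b)

-- B's stats dict as a flat fold over a pair list
def pvStats (bs : Int) (L : List (Int × Int)) : PySem.Dict Int (Int × Int × Int) :=
  L.foldl (fun d p => pvStatsStep bs d p.1 p.2) PySem.Dict.empty

-- max/min of a nonempty Int list as an Option (none on [])
def pvM (op : Int → Int → Int) : List Int → Option Int
  | [] => none
  | x :: t => some (t.foldl op x)

-- combine two optional extrema
def pvCmb (op : Int → Int → Int) : Option Int → Option Int → Option Int
  | none, y => y
  | some x, none => some x
  | some x, some y => some (op x y)

-- ---- the nested pair loop is a flat fold over A's rc_pairs list ----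

lemma pvInnerApp (i : Int) (js : List Int) : ∀ (L0 : List (Int × Int)),
    js.foldl (fun L j => if i ≠ j then L ++ [(i, j)] else L) L0
      = L0 ++ js.filterMap (fun j => if i ≠ j then some (i, j) else none) := by
  induction js with
  | nil => intro L0; simp
  | cons j t ih =>
    intro L0
    rw [List.foldl_cons, ih, List.filterMap_cons]
    by_cases h : i = j <;> simp [h]

lemma pvInnerG {σ : Type} (g : σ → Int × Int → σ) (i : Int) (js : List Int) : ∀ (a : σ),
    js.foldl (fun a j => if i ≠ j then g a (i, j) else a) a
      = (js.filterMap (fun j => if i ≠ j then some (i, j) else none)).foldl g a := by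
  induction js with
  | nil => intro a; simp
  | cons j t ih =>
    intro a
    rw [List.foldl_cons, ih, List.filterMap_cons]
    by_cases h : i = j <;> simp [h]

lemma pvAccOut (get : Int → List Int) (is : List Int) : ∀ (L0 : List (Int × Int)),
    is.foldl (fun L i => (get i).foldl (fun L j => if i ≠ j then L ++ [(i, j)] else L) L) L0
      = L0 ++ is.foldl (fun L i => (get i).foldl (fun L j => if i ≠ j then L ++ [(i, j)] else L) L) [] := by
  induction is with
  | nil => intro L0; simp
  | cons i t ih =>
    intro L0
    rw [List.foldl_cons, List.foldl_cons, pvInnerApp, pvInnerApp i (get i) []]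
    rw [ih, ih (([] : List (Int × Int)) ++ _)]
    simp [List.append_assoc]

lemma pvPairFold {σ : Type} (g : σ → Int × Int → σ) (get : Int → List Int) (is : List Int) :
    ∀ (init : σ),
    is.foldl (fun a i => (get i).foldl (fun a j => if i ≠ j then g a (i, j) else a) a) init
      = (is.foldl (fun L i => (get i).foldl (fun L j => if i ≠ j then L ++ [(i, j)] else L) L) []).foldl g init := by
  induction is with
  | nil => intro init; simp
  | cons i t ih =>
    intro init
    rw [List.foldl_cons, List.foldl_cons]
    rw [pvInnerG g i (get i) init]
    rw [ih]
    rw [pvInnerApp i (get i) []]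
    rw [List.nil_append]
    rw [pvAccOut get t (List.filterMap (fun j => if i ≠ j then some (i, j) else none) (get i))]
    rw [List.foldl_append]

-- ---- characterisation of B's stats dict ----

lemma pvStats_get? (bs : Int) (L : List (Int × Int)) (b : Int) :
    (pvStats bs L).get? b =
      match pvFlt bs b L with
      | [] => none
      | q :: t => some (((t.length : Int) + 1,
                         (t.map Prod.fst).foldl max q.1,
                         (t.map Prod.snd).foldl min q.2)) := by
  induction L using List.reverseRecOn with
  | nil => simp [pvStats, pvFlt, PySem.Dict.get?_empty]
  | append_singleton L p ih =>
    have hsnoc : pvStats bs (L ++ [p]) = pvStatsStep bs (pvStats bs L) p.1 p.2 := by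
      simp [pvStats, List.foldl_append]
    have hflt : pvFlt bs b (L ++ [p])
        = pvFlt bs b L ++ (if pvBin bs p = b then [p] else []) := by
      by_cases hb : pvBin bs p = b <;>
        simp [pvFlt, List.filter_append, hb]
    rw [hsnoc]
    unfold pvStatsStep
    have hkey : PySem.Int.floordiv (p.1 + p.2) bs = pvBin bs p := rfl
    rw [hkey, PySem.Dict.get?_insert]
    by_cases hb : b = pvBin bs p
    · rw [if_pos hb, ← hb, ih, hflt, if_pos hb.symm]
      cases hF : pvFlt bs b L with
      | nil => simp
      | cons q t =>
        simp only [List.cons_append]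
        simp [List.map_append, List.foldl_append]
    · rw [if_neg hb, ih, hflt, if_neg (fun hh => hb hh.symm), List.append_nil]

lemma pvStats_keys (bs : Int) (L : List (Int × Int)) :
    (pvStats bs L).keys = PySem.Set.ofList (L.map (pvBin bs)) := by
  induction L using List.reverseRecOn with
  | nil => simp [pvStats]
  | append_singleton L p ih =>
    have hsnoc : pvStats bs (L ++ [p]) = pvStatsStep bs (pvStats bs L) p.1 p.2 := by
      simp [pvStats, List.foldl_append]
    rw [hsnoc]
    unfold pvStatsStep
    have hkey : PySem.Int.floordiv (p.1 + p.2) bs = pvBin bs p := rfl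
    rw [hkey, List.map_append, List.map_singleton, PySem.Set.ofList_append_singleton, ← ih]
    by_cases hc : (pvStats bs L).contains (pvBin bs p) = true
    · rw [PySem.Dict.keys_insert_of_contains _ _ hc,
          PySem.Set.add_of_mem ((PySem.Dict.contains_iff_mem_keys _ _).mp hc)]
    · have hc' : (pvStats bs L).contains (pvBin bs p) = false := by
        cases h : (pvStats bs L).contains (pvBin bs p)
        · rfl
        · exact absurd h hc
      rw [PySem.Dict.keys_insert_of_not_contains _ _ hc',
          PySem.Set.add_of_not_mem (fun hm => hc ((PySem.Dict.contains_iff_mem_keys _ _).mpr hm))]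

lemma pvHist_eq_counter (bs : Int) (L : List (Int × Int)) :
    L.foldl (fun d p => d.modify (PySem.Int.floordiv (p.1 + p.2) bs) 0 (fun c => c + 1)) PySem.Dict.empty
      = PySem.Dict.counter (L.map (pvBin bs)) := by
  rw [PySem.Dict.counter_eq_foldl, List.foldl_map]
  rfl

lemma pvCount (bs b : Int) (L : List (Int × Int)) :
    List.count b (L.map (pvBin bs)) = (pvFlt bs b L).length := by
  simp only [pvFlt]
  rw [List.count_eq_countP, List.countP_map, List.countP_eq_length_filter]
  rfl

lemma pvContains_iff (bs : Int) (L : List (Int × Int)) (b : Int) :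
    (pvStats bs L).contains b = true ↔ pvFlt bs b L ≠ [] := by
  rw [PySem.Dict.contains_eq_isSome_get?, pvStats_get?]
  cases hF : pvFlt bs b L <;> simp

-- ---- congruence for Python max/min with a key ----

lemma pvMax?_congr {α κ : Type} [LT κ] [DecidableLT κ] (k1 k2 : α → κ) (xs : List α)
    (h : ∀ x ∈ xs, k1 x = k2 x) : PySem.List.max? xs k1 = PySem.List.max? xs k2 := by
  suffices haux : ∀ (ys : List α) (acc : Option α), (∀ x ∈ ys, k1 x = k2 x) →
      (∀ m, acc = some m → k1 m = k2 m) →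
      ys.foldl (fun acc x => match acc with
                 | none => some x
                 | some m => if k1 m < k1 x then some x else some m) acc
        = ys.foldl (fun acc x => match acc with
                 | none => some x
                 | some m => if k2 m < k2 x then some x else some m) acc by
    exact haux xs none h (by simp)
  intro ys
  induction ys with
  | nil => intro acc _ _; rfl
  | cons x t ih =>
    intro acc hx hacc
    rw [List.foldl_cons, List.foldl_cons]
    have hx0 : k1 x = k2 x := hx x (by simp)
    have ht : ∀ y ∈ t, k1 y = k2 y := fun y hy => hx y (by simp [hy])
    cases acc with
    | none =>
      exact ih (some x) ht (fun m hm => by cases hm; exact hx0)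
    | some m =>
      have hm : k1 m = k2 m := hacc m rfl
      simp only [hm, hx0]
      by_cases hlt : k2 m < k2 x
      · rw [if_pos hlt]
        exact ih (some x) ht (fun m' hm' => by cases hm'; exact hx0)
      · rw [if_neg hlt]
        exact ih (some m) ht (fun m' hm' => by cases hm'; exact hm)

-- ---- pvM machinery ----

lemma pvFoldl_shift (op : Int → Int → Int) (hassoc : ∀ a b c, op (op a b) c = op a (op b c))
    (t : List Int) (x y : Int) : t.foldl op (op x y) = op x (t.foldl op y) := by
  haveI : Std.Associative op := ⟨hassoc⟩
  exact List.foldl_assoc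

lemma pvM_cons (op : Int → Int → Int) (hassoc : ∀ a b c, op (op a b) c = op a (op b c))
    (x : Int) (xs : List Int) : pvM op (x :: xs) = pvCmb op (some x) (pvM op xs) := by
  cases xs with
  | nil => rfl
  | cons y t => simp [pvM, pvCmb, List.foldl_cons, pvFoldl_shift op hassoc]

lemma pvCmb_assoc (op : Int → Int → Int) (hassoc : ∀ a b c, op (op a b) c = op a (op b c))
    (a b c : Option Int) : pvCmb op (pvCmb op a b) c = pvCmb op a (pvCmb op b c) := by
  cases a <;> cases b <;> cases c <;> simp [pvCmb, hassoc]

lemma pvCmb_left_comm (op : Int → Int → Int) (hassoc : ∀ a b c, op (op a b) c = op a (op b c))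
    (hcomm : ∀ a b, op a b = op b a) (a b c : Option Int) :
    pvCmb op a (pvCmb op b c) = pvCmb op b (pvCmb op a c) := by
  have hlc : ∀ x y z, op x (op y z) = op y (op x z) := fun x y z => by
    rw [← hassoc, hcomm x y, hassoc]
  cases a <;> cases b <;> cases c <;> simp [pvCmb, hcomm, hlc]

lemma pvMax?_id (xs : List Int) : PySem.List.max? xs (fun x => x) = pvM max xs := by
  cases xs with
  | nil => rfl
  | cons x t => rw [PySem.List.max?_id_cons]; rfl

lemma pvMin?_id (xs : List Int) : PySem.List.min? xs (fun x => x) = pvM min xs := by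
  cases xs with
  | nil => rfl
  | cons x t => rw [PySem.List.min?_id_cons]; rfl

-- ---- partition of the candidate scan over the three bins ----

lemma pvM_or3 (op : Int → Int → Int) (hassoc : ∀ a b c, op (op a b) c = op a (op b c))
    (hcomm : ∀ a b, op a b = op b a) (g : Int × Int → Int) (bs b1 b2 b3 : Int)
    (h12 : b1 ≠ b2) (h13 : b1 ≠ b3) (h23 : b2 ≠ b3) (L : List (Int × Int)) :
    pvM op ((L.filter (fun p => pvBin bs p == b1 || pvBin bs p == b2 || pvBin bs p == b3)).map g)
      = pvCmb op (pvM op ((pvFlt bs b1 L).map g))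
          (pvCmb op (pvM op ((pvFlt bs b2 L).map g)) (pvM op ((pvFlt bs b3 L).map g))) := by
  induction L with
  | nil => simp [pvFlt, pvM, pvCmb]
  | cons p t ih =>
    have e1 : pvFlt bs b1 (p :: t)
        = if pvBin bs p = b1 then p :: pvFlt bs b1 t else pvFlt bs b1 t := by
      by_cases h : pvBin bs p = b1 <;> simp [pvFlt, h]
    have e2 : pvFlt bs b2 (p :: t)
        = if pvBin bs p = b2 then p :: pvFlt bs b2 t else pvFlt bs b2 t := by
      by_cases h : pvBin bs p = b2 <;> simp [pvFlt, h]
    have e3 : pvFlt bs b3 (p :: t)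
        = if pvBin bs p = b3 then p :: pvFlt bs b3 t else pvFlt bs b3 t := by
      by_cases h : pvBin bs p = b3 <;> simp [pvFlt, h]
    have eor : (p :: t).filter (fun q => pvBin bs q == b1 || pvBin bs q == b2 || pvBin bs q == b3)
        = if pvBin bs p = b1 ∨ pvBin bs p = b2 ∨ pvBin bs p = b3
          then p :: t.filter (fun q => pvBin bs q == b1 || pvBin bs q == b2 || pvBin bs q == b3)
          else t.filter (fun q => pvBin bs q == b1 || pvBin bs q == b2 || pvBin bs q == b3) := by
      by_cases h : pvBin bs p = b1 ∨ pvBin bs p = b2 ∨ pvBin bs p = b3 <;>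
        simp [List.filter_cons, h] <;> tauto
    by_cases h1 : pvBin bs p = b1
    · rw [eor, if_pos (Or.inl h1), e1, if_pos h1, e2, e3,
          if_neg (fun h => h12 (h1 ▸ h)), if_neg (fun h => h13 (h1 ▸ h))]
      simp only [List.map_cons]
      rw [pvM_cons op hassoc, pvM_cons op hassoc, ih, pvCmb_assoc op hassoc]
    · by_cases h2 : pvBin bs p = b2
      · rw [eor, if_pos (Or.inr (Or.inl h2)), e1, if_neg h1, e2, if_pos h2, e3,
            if_neg (fun h => h23 (h2 ▸ h))]
        simp only [List.map_cons]
        rw [pvM_cons op hassoc, pvM_cons op hassoc, ih,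
            pvCmb_assoc op hassoc, pvCmb_left_comm op hassoc hcomm]
      · by_cases h3 : pvBin bs p = b3
        · rw [eor, if_pos (Or.inr (Or.inr h3)), e1, if_neg h1, e2, if_neg h2, e3, if_pos h3]
          simp only [List.map_cons]
          rw [pvM_cons op hassoc, pvM_cons op hassoc, ih,
              pvCmb_left_comm op hassoc hcomm (pvM op (List.map g (pvFlt bs b2 t))),
              pvCmb_left_comm op hassoc hcomm]
        · rw [eor, if_neg (by tauto), e1, if_neg h1, e2, if_neg h2, e3, if_neg h3, ih]

-- ---- B's scan over the (up to three) present neighbouring bins ----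

lemma pvNear (op : Int → Int → Int) (hassoc : ∀ a b c, op (op a b) c = op a (op b c))
    (b1 b2 b3 : Int) (c : Int → Bool) (g : Int → Int) (M1 M2 M3 : Option Int)
    (h1 : M1 = if c b1 = true then some (g b1) else none)
    (h2 : M2 = if c b2 = true then some (g b2) else none)
    (h3 : M3 = if c b3 = true then some (g b3) else none) :
    pvM op (([b1, b2, b3].filter c).map g) = pvCmb op M1 (pvCmb op M2 M3) := by
  subst h1 h2 h3
  cases hc1 : c b1 <;> cases hc2 : c b2 <;> cases hc3 : c b3 <;>
    simp [List.filter, hc1, hc2, hc3, pvM, pvCmb, hassoc]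

-- stats stores exactly the per-bin extrema of the pair list
lemma pvStatsMax (bs : Int) (L : List (Int × Int)) (b : Int)
    (h : (pvStats bs L).contains b = true) :
    some ((pvStats bs L).getD b (0, 0, 0)).2.1 = pvM max ((pvFlt bs b L).map Prod.fst) := by
  have hc := (pvContains_iff bs L b).mp h
  have hget := pvStats_get? bs L b
  cases hF : pvFlt bs b L with
  | nil => exact absurd hF hc
  | cons q t =>
    rw [hF] at hget
    rw [PySem.Dict.getD_eq_get?_getD, hget]
    simp [pvM]

lemma pvStatsMin (bs : Int) (L : List (Int × Int)) (b : Int)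
    (h : (pvStats bs L).contains b = true) :
    some ((pvStats bs L).getD b (0, 0, 0)).2.2 = pvM min ((pvFlt bs b L).map Prod.snd) := by
  have hc := (pvContains_iff bs L b).mp h
  have hget := pvStats_get? bs L b
  cases hF : pvFlt bs b L with
  | nil => exact absurd hF hc
  | cons q t =>
    rw [hF] at hget
    rw [PySem.Dict.getD_eq_get?_getD, hget]
    simp [pvM]

lemma pvFlt_nil_of_not_contains (bs : Int) (L : List (Int × Int)) (b : Int)
    (h : (pvStats bs L).contains b = false) : pvFlt bs b L = [] := by
  by_contra hne
  have := (pvContains_iff bs L b).mpr hne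
  rw [h] at this
  exact Bool.false_ne_true this

lemma pvStatsFold (bs : Int) (get : Int → List Int) (is : List Int) :
    is.foldl (fun d i => (get i).foldl (fun d j => if i ≠ j then pvStatsStep bs d i j else d) d) PySem.Dict.empty
      = pvStats bs (is.foldl (fun L i => (get i).foldl (fun L j => if i ≠ j then L ++ [(i, j)] else L) L) []) := by
  have h := pvPairFold (fun d (p : Int × Int) => pvStatsStep bs d p.1 p.2) get is PySem.Dict.empty
  simpa [pvStats] using h

-- the shared tail: A's three passes over a pair list L equal B's read-off from pvStats
lemma pvCore (n k min_seeds : Int) (L : List (Int × Int)) :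
    (let hist := List.foldl (fun d p => d.modify (PySem.Int.floordiv (p.1 + p.2) (max 5 k)) 0 (fun c => c + 1)) PySem.Dict.empty L
     let peak : Int := (PySem.List.max? hist.keys (fun b => hist.getD b 0)).getD 0
     if L = [] then ((1 : Int), n, (1 : Int), n)
     else if hist.getD peak 0 < max 1 min_seeds then (1, n, 1, n)
     else
       let cand0 := L.filter (fun p => decide ((PySem.Int.floordiv (p.1 + p.2) (max 5 k) - peak).natAbs ≤ 1))
       let cand := if cand0 = [] then L else cand0
       let max_i : Int := (PySem.List.max? (cand.map Prod.fst) (fun x => x)).getD 0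
       let min_j : Int := (PySem.List.min? (cand.map Prod.snd) (fun x => x)).getD 0
       (1, PySem.Int.floordiv (max_i + k + min_j) 2, PySem.Int.floordiv (max_i + k + min_j) 2 + 1, n))
    = (let stats := pvStats (max 5 k) L
       let peak : Int := (PySem.List.max? stats.keys (fun b => (stats.getD b (0, 0, 0)).1)).getD 0
       if stats.items = [] then ((1 : Int), n, (1 : Int), n)
       else if (stats.getD peak (0, 0, 0)).1 < max 1 min_seeds then (1, n, 1, n)
       else
         let near := [peak - 1, peak, peak + 1].filter (fun b => stats.contains b)
         let max_i : Int := (PySem.List.max? (near.map (fun b => (stats.getD b (0, 0, 0)).2.1)) (fun x => x)).getD 0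
         let min_j : Int := (PySem.List.min? (near.map (fun b => (stats.getD b (0, 0, 0)).2.2)) (fun x => x)).getD 0
         (1, PySem.Int.floordiv (max_i + k + min_j) 2, PySem.Int.floordiv (max_i + k + min_j) 2 + 1, n)) := by
  by_cases hL : L = []
  · subst hL; rfl
  · dsimp only
    obtain ⟨p0, hp0⟩ := List.exists_mem_of_ne_nil L hL
    rw [if_neg hL, pvHist_eq_counter (max 5 k) L]
    have hkeysne : (pvStats (max 5 k) L).keys ≠ [] := by
      rw [pvStats_keys]
      intro h0
      have hm : pvBin (max 5 k) p0 ∈ PySem.Set.ofList (L.map (pvBin (max 5 k))) :=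
        (PySem.Set.mem_ofList _ _).mpr (List.mem_map_of_mem hp0)
      rw [h0] at hm
      exact List.not_mem_nil hm
    have hitems : ¬ ((pvStats (max 5 k) L).items = []) := by
      intro h0
      apply hkeysne
      simp only [PySem.Dict.keys, h0, List.map_nil]
    rw [if_neg hitems]
    have hkeys : (PySem.Dict.counter (L.map (pvBin (max 5 k)))).keys = (pvStats (max 5 k) L).keys := by
      rw [PySem.Dict.keys_counter, pvStats_keys]
    have hFne : ∀ b ∈ (pvStats (max 5 k) L).keys, pvFlt (max 5 k) b L ≠ [] := by
      intro b hb
      rw [pvStats_keys] at hb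
      obtain ⟨p, hpL, hpb⟩ := List.mem_map.mp ((PySem.Set.mem_ofList _ _).mp hb)
      intro hnil
      have hmem : p ∈ pvFlt (max 5 k) b L :=
        List.mem_filter.mpr ⟨hpL, by simp [hpb]⟩
      rw [hnil] at hmem
      exact List.not_mem_nil hmem
    have hvals : ∀ b ∈ (pvStats (max 5 k) L).keys,
        (PySem.Dict.counter (L.map (pvBin (max 5 k)))).getD b 0 = ((pvStats (max 5 k) L).getD b (0, 0, 0)).1 := by
      intro b hb
      cases hF : pvFlt (max 5 k) b L with
      | nil => exact absurd hF (hFne b hb)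
      | cons q t =>
        have h2 := pvStats_get? (max 5 k) L b
        rw [hF] at h2
        rw [PySem.Dict.getD_counter, pvCount (max 5 k) b L, hF,
            PySem.Dict.getD_eq_get?_getD, h2]
        simp
    have hpk : PySem.List.max? (PySem.Dict.counter (L.map (pvBin (max 5 k)))).keys
          (fun b => (PySem.Dict.counter (L.map (pvBin (max 5 k)))).getD b 0)
        = PySem.List.max? (pvStats (max 5 k) L).keys
          (fun b => ((pvStats (max 5 k) L).getD b (0, 0, 0)).1) := by
      rw [hkeys]
      exact pvMax?_congr _ _ _ hvals
    obtain ⟨pk, hpkeq⟩ : ∃ pk, PySem.List.max? (pvStats (max 5 k) L).keys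
        (fun b => ((pvStats (max 5 k) L).getD b (0, 0, 0)).1) = some pk := by
      cases hmx : PySem.List.max? (pvStats (max 5 k) L).keys
          (fun b => ((pvStats (max 5 k) L).getD b (0, 0, 0)).1) with
      | none => exact absurd ((PySem.List.max?_eq_none_iff _ _).mp hmx) hkeysne
      | some m => exact ⟨m, rfl⟩
    rw [hpk, hpkeq]
    simp only [Option.getD_some]
    have hpkmem : pk ∈ (pvStats (max 5 k) L).keys := PySem.List.max?_mem hpkeq
    rw [hvals pk hpkmem]
    by_cases hg : ((pvStats (max 5 k) L).getD pk (0, 0, 0)).1 < max 1 min_seeds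
    · rw [if_pos hg, if_pos hg]
    · rw [if_neg hg, if_neg hg]
      obtain ⟨p1, hp1L, hp1b⟩ : ∃ p ∈ L, pvBin (max 5 k) p = pk := by
        rw [pvStats_keys] at hpkmem
        obtain ⟨p, hpL, hpb⟩ := List.mem_map.mp ((PySem.Set.mem_ofList _ _).mp hpkmem)
        exact ⟨p, hpL, hpb⟩
      have hbin_def : ∀ (p : Int × Int), PySem.Int.floordiv (p.1 + p.2) (max 5 k) = pvBin (max 5 k) p :=
        fun p => rfl
      simp only [hbin_def]
      have hcand0 : L.filter (fun p => decide ((pvBin (max 5 k) p - pk).natAbs ≤ 1))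
          = L.filter (fun p => pvBin (max 5 k) p == pk - 1 || pvBin (max 5 k) p == pk || pvBin (max 5 k) p == pk + 1) := by
        apply List.filter_congr
        intro p _
        rw [Bool.eq_iff_iff]
        simp only [decide_eq_true_eq, Bool.or_eq_true, beq_iff_eq]
        omega
      rw [hcand0]
      have hc0ne : L.filter (fun p => pvBin (max 5 k) p == pk - 1 || pvBin (max 5 k) p == pk || pvBin (max 5 k) p == pk + 1) ≠ [] := by
        intro h0
        have hmem : p1 ∈ L.filter (fun p => pvBin (max 5 k) p == pk - 1 || pvBin (max 5 k) p == pk || pvBin (max 5 k) p == pk + 1) :=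
          List.mem_filter.mpr ⟨hp1L, by simp [hp1b]⟩
        rw [h0] at hmem
        exact List.not_mem_nil hmem
      rw [if_neg hc0ne]
      have hmaxassoc : ∀ a b c : Int, max (max a b) c = max a (max b c) := fun a b c => max_assoc a b c
      have hmaxcomm : ∀ a b : Int, max a b = max b a := fun a b => max_comm a b
      have hminassoc : ∀ a b c : Int, min (min a b) c = min a (min b c) := fun a b c => min_assoc a b c
      have hmincomm : ∀ a b : Int, min a b = min b a := fun a b => min_comm a b
      have hne12 : (pk - 1 : Int) ≠ pk := by omega
      have hne13 : (pk - 1 : Int) ≠ pk + 1 := by omega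
      have hne23 : (pk : Int) ≠ pk + 1 := by omega
      have hMA : PySem.List.max? ((L.filter (fun p => pvBin (max 5 k) p == pk - 1 || pvBin (max 5 k) p == pk || pvBin (max 5 k) p == pk + 1)).map Prod.fst) (fun x => x)
          = pvCmb max (pvM max ((pvFlt (max 5 k) (pk - 1) L).map Prod.fst))
              (pvCmb max (pvM max ((pvFlt (max 5 k) pk L).map Prod.fst))
                (pvM max ((pvFlt (max 5 k) (pk + 1) L).map Prod.fst))) := by
        rw [pvMax?_id]
        exact pvM_or3 max hmaxassoc hmaxcomm Prod.fst (max 5 k) (pk - 1) pk (pk + 1) hne12 hne13 hne23 L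
      have hMI : PySem.List.min? ((L.filter (fun p => pvBin (max 5 k) p == pk - 1 || pvBin (max 5 k) p == pk || pvBin (max 5 k) p == pk + 1)).map Prod.snd) (fun x => x)
          = pvCmb min (pvM min ((pvFlt (max 5 k) (pk - 1) L).map Prod.snd))
              (pvCmb min (pvM min ((pvFlt (max 5 k) pk L).map Prod.snd))
                (pvM min ((pvFlt (max 5 k) (pk + 1) L).map Prod.snd))) := by
        rw [pvMin?_id]
        exact pvM_or3 min hminassoc hmincomm Prod.snd (max 5 k) (pk - 1) pk (pk + 1) hne12 hne13 hne23 L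
      have hIfMax : ∀ b : Int, pvM max ((pvFlt (max 5 k) b L).map Prod.fst)
          = if (pvStats (max 5 k) L).contains b = true
            then some (((pvStats (max 5 k) L).getD b (0, 0, 0)).2.1) else none := by
        intro b
        by_cases hcb : (pvStats (max 5 k) L).contains b = true
        · rw [if_pos hcb]
          exact (pvStatsMax (max 5 k) L b hcb).symm
        · have hcb' : (pvStats (max 5 k) L).contains b = false := by
            cases h : (pvStats (max 5 k) L).contains b
            · rfl
            · exact absurd h hcb
          rw [if_neg hcb, pvFlt_nil_of_not_contains (max 5 k) L b hcb']
          rfl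
      have hIfMin : ∀ b : Int, pvM min ((pvFlt (max 5 k) b L).map Prod.snd)
          = if (pvStats (max 5 k) L).contains b = true
            then some (((pvStats (max 5 k) L).getD b (0, 0, 0)).2.2) else none := by
        intro b
        by_cases hcb : (pvStats (max 5 k) L).contains b = true
        · rw [if_pos hcb]
          exact (pvStatsMin (max 5 k) L b hcb).symm
        · have hcb' : (pvStats (max 5 k) L).contains b = false := by
            cases h : (pvStats (max 5 k) L).contains b
            · rfl
            · exact absurd h hcb
          rw [if_neg hcb, pvFlt_nil_of_not_contains (max 5 k) L b hcb']
          rfl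
      have hMB : PySem.List.max? (([pk - 1, pk, pk + 1].filter (fun b => (pvStats (max 5 k) L).contains b)).map
            (fun b => ((pvStats (max 5 k) L).getD b (0, 0, 0)).2.1)) (fun x => x)
          = pvCmb max (pvM max ((pvFlt (max 5 k) (pk - 1) L).map Prod.fst))
              (pvCmb max (pvM max ((pvFlt (max 5 k) pk L).map Prod.fst))
                (pvM max ((pvFlt (max 5 k) (pk + 1) L).map Prod.fst))) := by
        rw [pvMax?_id]
        exact pvNear max hmaxassoc (pk - 1) pk (pk + 1)
          (fun b => (pvStats (max 5 k) L).contains b)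
          (fun b => ((pvStats (max 5 k) L).getD b (0, 0, 0)).2.1) _ _ _
          (hIfMax (pk - 1)) (hIfMax pk) (hIfMax (pk + 1))
      have hNB : PySem.List.min? (([pk - 1, pk, pk + 1].filter (fun b => (pvStats (max 5 k) L).contains b)).map
            (fun b => ((pvStats (max 5 k) L).getD b (0, 0, 0)).2.2)) (fun x => x)
          = pvCmb min (pvM min ((pvFlt (max 5 k) (pk - 1) L).map Prod.snd))
              (pvCmb min (pvM min ((pvFlt (max 5 k) pk L).map Prod.snd))
                (pvM min ((pvFlt (max 5 k) (pk + 1) L).map Prod.snd))) := by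
        rw [pvMin?_id]
        exact pvNear min hminassoc (pk - 1) pk (pk + 1)
          (fun b => (pvStats (max 5 k) L).contains b)
          (fun b => ((pvStats (max 5 k) L).getD b (0, 0, 0)).2.2) _ _ _
          (hIfMin (pk - 1)) (hIfMin pk) (hIfMin (pk + 1))
      rw [hMA, hMI, hMB, hNB]

-- ===== VERDICT (by name: the statement is the Claim_ definition above) =====
theorem rc_repeats_coords_spec : Claim_equal_rc_repeats_coords := by
  intro s k step min_seeds _hdom _hpre
  unfold Spec_rc_repeats_coords rc_repeats_coords rc_repeats_coords_alt
  dsimp only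
  rw [pvStatsFold]
  exact pvCore (PySem.List.len s.toList) k min_seeds
    (List.foldl
      (fun L i =>
        List.foldl (fun L j => if i ≠ j then L ++ [(i, j)] else L) L
          ((List.foldl (fun d i => d.modify (pvKmer s.toList k i) [] fun l => l ++ [i]) PySem.Dict.empty
                (PySem.List.pyRange 0 (PySem.List.len s.toList - k + 1) step)).getD
            (pvRevcomp (pvKmer s.toList k i)) []))
      [] (PySem.List.pyRange 0 (PySem.List.len s.toList - k + 1) step))
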